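-- pv_equiv track=rewrite | github.com/elocemearg/atropine | webroot/cgi-bin/fieldstorage.py | cgi_parse_params
-- ===== SOURCE A (Python) =====
-- PARAM_STATE_NAME = 0
--
-- PARAM_STATE_VALUE_OR_QUOTE = 1
--
-- PARAM_STATE_QUOTED_STRING = 2
--
-- PARAM_STATE_STRING = 3
--
-- PARAM_STATE_AFTER_QUOTED_STRING = 4
--
-- def cgi_parse_params(s):
--     params = {}
--     name = []
--     value = []
--     state = 0
--     s = s + "\0"
--     for c in s:
--         if state == PARAM_STATE_NAME:
--             # name
--             if c == '=':
--                 # value follows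
--                 state = PARAM_STATE_VALUE_OR_QUOTE
--             elif c == ';' or c == '\0':
--                 # new parameter follows
--                 state = PARAM_STATE_NAME
--                 params["".join(name).strip()] = ""
--                 name = []
--                 value = []
--             else:
--                 name.append(c)
--         elif state == PARAM_STATE_VALUE_OR_QUOTE:
--             # value or quote character
--             if c == '\"':
--                 # quoted string value
--                 state = PARAM_STATE_QUOTED_STRING
--             elif c == ';' or c == '\0':
--                 # Blank value
--                 params["".join(name).strip()] = ""
--                 name = []
--                 value = []
--                 state = PARAM_STATE_NAME
--             elif not c.isspace():
--                 # unquoted string value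
--                 state = PARAM_STATE_STRING
--                 value.append(c)
--         elif state == PARAM_STATE_QUOTED_STRING:
--             # quoted string value
--             if c == '\"' or c == '\0':
--                 # after the end of the value, expect semicolon next
--                 state = PARAM_STATE_AFTER_QUOTED_STRING
--                 params["".join(name).strip()] = "".join(value)
--                 name = []
--                 value = []
--             elif c != '\0':
--                 value.append(c)
--         elif state == PARAM_STATE_STRING:
--             # Unquoted value - read until we see a semicolon or end
--             if c == ';' or c == '\0':
--                 state = PARAM_STATE_NAME
--                 params["".join(name).strip()] = "".join(value).strip()
--                 name = []
--                 value = []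
--             else:
--                 value.append(c)
--         elif state == PARAM_STATE_AFTER_QUOTED_STRING:
--             # Ignore characters until the next semicolon
--             if c == ';':
--                 state = PARAM_STATE_NAME
--     if "" in params:
--         del params[""]
--     return params
-- ===== SOURCE B (Python) =====
-- def cgi_parse_params(s):
--     params = {}
--     n = len(s)
--     i = 0
--     while True:
--         # read the name: advance until '=' or ';' or end
--         j = i
--         while j < n and s[j] != '=' and s[j] != ';':
--             j += 1
--         name = s[i:j].strip()
--         if j >= n:
--             params[name] = ""
--             break
--         if s[j] == ';':
--             params[name] = ""
--             i = j + 1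
--             continue
--         # s[j] == '=': skip spaces before the value
--         k = j + 1
--         while k < n and s[k].isspace():
--             k += 1
--         if k >= n:
--             params[name] = ""
--             break
--         if s[k] == ';':
--             params[name] = ""
--             i = k + 1
--             continue
--         if s[k] == '"':
--             # quoted value: raw until the next '"' or end, never stripped
--             m = k + 1
--             while m < n and s[m] != '"':
--                 m += 1
--             params[name] = s[k + 1:m]
--             if m >= n:
--                 break
--             # ignore everything up to the next ';'
--             t = m + 1
--             while t < n and s[t] != ';':
--                 t += 1
--             if t >= n:
--                 break
--             i = t + 1
--             continue
--         # unquoted value: until ';' or end, stripped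
--         m = k
--         while m < n and s[m] != ';':
--             m += 1
--         params[name] = s[k:m].strip()
--         if m >= n:
--             break
--         i = m + 1
--     if "" in params:
--         del params[""]
--     return params
-- ===== Notes on version B (the rewrite author's own statement) =====
-- stated objective: alternative
-- what changed: Replaces A's five-state one-character-at-a-time machine (driven by a sentinel appended to the input and by accumulator buffers) with a segment parser that, per parameter, scans off the name, skips the separator and any spaces, and slices out the quoted or unquoted value region in one go.
import Mathlib
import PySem

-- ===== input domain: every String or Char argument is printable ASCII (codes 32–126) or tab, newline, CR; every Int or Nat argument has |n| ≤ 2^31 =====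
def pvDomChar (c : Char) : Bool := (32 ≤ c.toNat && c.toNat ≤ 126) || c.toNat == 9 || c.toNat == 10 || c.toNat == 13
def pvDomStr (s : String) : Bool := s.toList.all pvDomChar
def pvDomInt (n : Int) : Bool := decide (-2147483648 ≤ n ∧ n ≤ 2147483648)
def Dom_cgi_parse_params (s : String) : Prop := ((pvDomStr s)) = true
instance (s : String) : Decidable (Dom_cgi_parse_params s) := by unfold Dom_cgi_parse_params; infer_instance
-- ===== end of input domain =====

-- B replaces A's five-state character-by-character machine (driven by a sentinel appended to
-- the input) by a segment parser that reads each name/value group at once; same results, no speed claim.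

-- ===== PORT A =====
def PARAM_STATE_NAME : Nat := 0
def PARAM_STATE_VALUE_OR_QUOTE : Nat := 1
def PARAM_STATE_QUOTED_STRING : Nat := 2
def PARAM_STATE_STRING : Nat := 3
def PARAM_STATE_AFTER_QUOTED_STRING : Nat := 4

-- one iteration of A's for-loop; the tuple is (params, name, value, state);
-- "".join(buf).strip() is computed on the char list as String.ofList (PySem.Chars.strip buf)
def pvStepA (acc : PySem.Dict String String × List Char × List Char × Nat) (c : Char) :
    PySem.Dict String String × List Char × List Char × Nat :=
  match acc with
  | (params, name, value, state) =>
    if state = PARAM_STATE_NAME then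
      if c = '=' then (params, name, value, PARAM_STATE_VALUE_OR_QUOTE)
      else if c = ';' ∨ c = '\x00' then
        (params.insert (String.ofList (PySem.Chars.strip name)) "", [], [], PARAM_STATE_NAME)
      else (params, name ++ [c], value, state)
    else if state = PARAM_STATE_VALUE_OR_QUOTE then
      if c = '"' then (params, name, value, PARAM_STATE_QUOTED_STRING)
      else if c = ';' ∨ c = '\x00' then
        (params.insert (String.ofList (PySem.Chars.strip name)) "", [], [], PARAM_STATE_NAME)
      else if ¬ (PySem.Chars.isspace c = true) then (params, name, value ++ [c], PARAM_STATE_STRING)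
      else acc
    else if state = PARAM_STATE_QUOTED_STRING then
      if c = '"' ∨ c = '\x00' then
        (params.insert (String.ofList (PySem.Chars.strip name)) (String.ofList value), [], [],
          PARAM_STATE_AFTER_QUOTED_STRING)
      else if c ≠ '\x00' then (params, name, value ++ [c], state)
      else acc
    else if state = PARAM_STATE_STRING then
      if c = ';' ∨ c = '\x00' then
        (params.insert (String.ofList (PySem.Chars.strip name)) (String.ofList (PySem.Chars.strip value)),
          [], [], PARAM_STATE_NAME)
      else (params, name, value ++ [c], state)
    else if state = PARAM_STATE_AFTER_QUOTED_STRING then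
      if c = ';' then (params, name, value, PARAM_STATE_NAME) else acc
    else acc

def cgi_parse_params (s : String) : List (String × String) :=
  let r := (s.toList ++ ['\x00']).foldl pvStepA
    ((PySem.Dict.empty : PySem.Dict String String), [], [], PARAM_STATE_NAME)
  let params := r.1
  (if params.contains "" then params.erase "" else params).items

-- ===== PORT B =====
def pvNotNameEnd (c : Char) : Bool := c != '=' && c != ';'
def pvNotQuote (c : Char) : Bool := c != '"'
def pvNotSemi (c : Char) : Bool := c != ';'

-- termination helper for pvParseB (cited in its decreasing_by)
theorem pv_dropWhile_cons_len {p : Char → Bool} {l r : List Char} {c : Char}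
    (h : l.dropWhile p = c :: r) : r.length < l.length := by
  have := List.length_dropWhile_le p l
  rw [h] at this; simp at this; omega

-- Source B's while-loop, one recursive call per ';'-advance; the inner scanning loops are the
-- takeWhile/dropWhile splits
def pvParseB (l : List Char) (d : PySem.Dict String String) : PySem.Dict String String :=
  let name := String.ofList (PySem.Chars.strip (l.takeWhile pvNotNameEnd))
  match h : l.dropWhile pvNotNameEnd with
  | [] => d.insert name ""
  | c :: r =>
    if c = ';' then pvParseB r (d.insert name "")
    else
      match h2 : r.dropWhile PySem.Chars.isspace with
      | [] => d.insert name ""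
      | c2 :: t =>
        if c2 = ';' then pvParseB t (d.insert name "")
        else if c2 = '"' then
          let v := String.ofList (t.takeWhile pvNotQuote)
          match h3 : t.dropWhile pvNotQuote with
          | [] => d.insert name v
          | _ :: u =>
            match h4 : u.dropWhile pvNotSemi with
            | [] => d.insert name v
            | _ :: w => pvParseB w (d.insert name v)
        else
          let v := String.ofList (PySem.Chars.strip ((c2 :: t).takeWhile pvNotSemi))
          match h5 : (c2 :: t).dropWhile pvNotSemi with
          | [] => d.insert name v
          | _ :: w => pvParseB w (d.insert name v)
termination_by l.length
decreasing_by
  · exact pv_dropWhile_cons_len h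
  · have a := pv_dropWhile_cons_len h
    have b := pv_dropWhile_cons_len h2
    omega
  · have a := pv_dropWhile_cons_len h
    have b := pv_dropWhile_cons_len h2
    have c3 := pv_dropWhile_cons_len h3
    have d4 := pv_dropWhile_cons_len h4
    omega
  · have a := pv_dropWhile_cons_len h
    have b := pv_dropWhile_cons_len h2
    have e := pv_dropWhile_cons_len h5
    simp at e
    omega

def cgi_parse_params_alt (s : String) : List (String × String) :=
  let params := pvParseB s.toList (PySem.Dict.empty : PySem.Dict String String)
  (if params.contains "" then params.erase "" else params).items

-- ===== PRECONDITION & SPEC =====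
def Spec_cgi_parse_params (s : String) (out : List (String × String)) : Prop := out = cgi_parse_params_alt s
instance (s : String) (out : List (String × String)) : Decidable (Spec_cgi_parse_params s out) := by unfold Spec_cgi_parse_params; infer_instance

-- ===== CLAIM (what is proved, stated in full; the proofs are below) =====
def Claim_equal_cgi_parse_params : Prop := ∀ (s : String), Dom_cgi_parse_params s → Spec_cgi_parse_params s (cgi_parse_params s)

-- ===== LEMMAS AND PROOFS =====

-- state NAME accumulates ordinary characters into the name buffer
theorem pv_runA_name (cs : List Char) (d : PySem.Dict String String) (nm v : List Char)
    (hcs : ∀ c ∈ cs, pvNotNameEnd c = true ∧ c ≠ '\x00') :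
    cs.foldl pvStepA (d, nm, v, 0) = (d, nm ++ cs, v, 0) := by
  induction cs generalizing nm with
  | nil => simp
  | cons c cs ih =>
    obtain ⟨h1, h2⟩ := hcs c (by simp)
    have he : c ≠ '=' ∧ c ≠ ';' := by simpa [pvNotNameEnd] using h1
    rw [List.foldl_cons]
    have : pvStepA (d, nm, v, 0) c = (d, nm ++ [c], v, 0) := by
      simp [pvStepA, PARAM_STATE_NAME, he.1, he.2, h2]
    rw [this, ih _ (fun c hc => hcs c (by simp [hc]))]
    simp

-- state VALUE_OR_QUOTE skips whitespace
theorem pv_runA_skip (cs : List Char) (d : PySem.Dict String String) (nm v : List Char)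
    (hcs : ∀ c ∈ cs, PySem.Chars.isspace c = true) :
    cs.foldl pvStepA (d, nm, v, 1) = (d, nm, v, 1) := by
  induction cs with
  | nil => simp
  | cons c cs ih =>
    have hsp := hcs c (by simp)
    have hq : c ≠ '"' := by rintro rfl; rw [show PySem.Chars.isspace '"' = false from by decide] at hsp; cases hsp
    have hs : c ≠ ';' := by rintro rfl; rw [show PySem.Chars.isspace ';' = false from by decide] at hsp; cases hsp
    have hn : c ≠ '\x00' := by rintro rfl; rw [show PySem.Chars.isspace '\x00' = false from by decide] at hsp; cases hsp
    rw [List.foldl_cons]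
    have : pvStepA (d, nm, v, 1) c = (d, nm, v, 1) := by
      simp [pvStepA, PARAM_STATE_NAME, PARAM_STATE_VALUE_OR_QUOTE, hq, hs, hn, hsp]
    rw [this, ih (fun c hc => hcs c (by simp [hc]))]

-- state QUOTED_STRING accumulates into the value buffer
theorem pv_runA_quoted (cs : List Char) (d : PySem.Dict String String) (nm v : List Char)
    (hcs : ∀ c ∈ cs, c ≠ '"' ∧ c ≠ '\x00') :
    cs.foldl pvStepA (d, nm, v, 2) = (d, nm, v ++ cs, 2) := by
  induction cs generalizing v with
  | nil => simp
  | cons c cs ih =>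
    obtain ⟨h1, h2⟩ := hcs c (by simp)
    rw [List.foldl_cons]
    have : pvStepA (d, nm, v, 2) c = (d, nm, v ++ [c], 2) := by
      simp [pvStepA, PARAM_STATE_NAME, PARAM_STATE_VALUE_OR_QUOTE, PARAM_STATE_QUOTED_STRING, h1, h2]
    rw [this, ih _ (fun c hc => hcs c (by simp [hc]))]
    simp

-- state STRING accumulates into the value buffer
theorem pv_runA_string (cs : List Char) (d : PySem.Dict String String) (nm v : List Char)
    (hcs : ∀ c ∈ cs, c ≠ ';' ∧ c ≠ '\x00') :
    cs.foldl pvStepA (d, nm, v, 3) = (d, nm, v ++ cs, 3) := by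
  induction cs generalizing v with
  | nil => simp
  | cons c cs ih =>
    obtain ⟨h1, h2⟩ := hcs c (by simp)
    rw [List.foldl_cons]
    have : pvStepA (d, nm, v, 3) c = (d, nm, v ++ [c], 3) := by
      simp [pvStepA, PARAM_STATE_NAME, PARAM_STATE_VALUE_OR_QUOTE, PARAM_STATE_QUOTED_STRING,
        PARAM_STATE_STRING, h1, h2]
    rw [this, ih _ (fun c hc => hcs c (by simp [hc]))]
    simp

-- state AFTER_QUOTED_STRING ignores everything but ';'
theorem pv_runA_after (cs : List Char) (d : PySem.Dict String String) (nm v : List Char)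
    (hcs : ∀ c ∈ cs, c ≠ ';') :
    cs.foldl pvStepA (d, nm, v, 4) = (d, nm, v, 4) := by
  induction cs with
  | nil => simp
  | cons c cs ih =>
    have h1 := hcs c (by simp)
    rw [List.foldl_cons]
    have : pvStepA (d, nm, v, 4) c = (d, nm, v, 4) := by
      simp [pvStepA, PARAM_STATE_NAME, PARAM_STATE_VALUE_OR_QUOTE, PARAM_STATE_QUOTED_STRING,
        PARAM_STATE_STRING, PARAM_STATE_AFTER_QUOTED_STRING, h1]
    rw [this, ih (fun c hc => hcs c (by simp [hc]))]

-- head of a dropWhile fails the predicate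
theorem pv_dropWhile_head {p : Char → Bool} {l r : List Char} {c : Char}
    (h : l.dropWhile p = c :: r) : p c = false := by
  induction l with
  | nil => simp at h
  | cons x xs ih =>
    rw [List.dropWhile_cons] at h
    by_cases hp : p x
    · rw [if_pos hp] at h; exact ih h
    · rw [if_neg hp] at h
      cases h
      simpa using hp

theorem pv_suffix_mem {p : Char → Bool} {l r : List Char} {c : Char}
    (h : l.dropWhile p = c :: r) : c ∈ l ∧ ∀ x ∈ r, x ∈ l := by
  have hs := (List.dropWhile_suffix (l := l) p).sublist.subset
  refine ⟨hs (by rw [h]; simp), fun y hy => hs (by rw [h]; simp [hy])⟩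

theorem pv_take_mem {p : Char → Bool} {l : List Char} :
    ∀ x ∈ l.takeWhile p, p x = true ∧ x ∈ l :=
  fun x hx => ⟨List.mem_takeWhile_imp hx, (List.takeWhile_sublist p).subset hx⟩

-- single-step evaluation lemmas for pvStepA
theorem pv_s0_nul (d : PySem.Dict String String) (nm v : List Char) :
    pvStepA (d, nm, v, 0) '\x00' =
      (d.insert (String.ofList (PySem.Chars.strip nm)) "", [], [], 0) := by
  simp [pvStepA, PARAM_STATE_NAME]

theorem pv_s0_semi (d : PySem.Dict String String) (nm v : List Char) :
    pvStepA (d, nm, v, 0) ';' =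
      (d.insert (String.ofList (PySem.Chars.strip nm)) "", [], [], 0) := by
  simp [pvStepA, PARAM_STATE_NAME]

theorem pv_s0_eq (d : PySem.Dict String String) (nm v : List Char) :
    pvStepA (d, nm, v, 0) '=' = (d, nm, v, 1) := by
  simp [pvStepA, PARAM_STATE_NAME, PARAM_STATE_VALUE_OR_QUOTE]

theorem pv_s1_nul (d : PySem.Dict String String) (nm v : List Char) :
    pvStepA (d, nm, v, 1) '\x00' =
      (d.insert (String.ofList (PySem.Chars.strip nm)) "", [], [], 0) := by
  simp [pvStepA, PARAM_STATE_NAME, PARAM_STATE_VALUE_OR_QUOTE]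

theorem pv_s1_semi (d : PySem.Dict String String) (nm v : List Char) :
    pvStepA (d, nm, v, 1) ';' =
      (d.insert (String.ofList (PySem.Chars.strip nm)) "", [], [], 0) := by
  simp [pvStepA, PARAM_STATE_NAME, PARAM_STATE_VALUE_OR_QUOTE]

theorem pv_s1_quote (d : PySem.Dict String String) (nm v : List Char) :
    pvStepA (d, nm, v, 1) '"' = (d, nm, v, 2) := by
  simp [pvStepA, PARAM_STATE_NAME, PARAM_STATE_VALUE_OR_QUOTE, PARAM_STATE_QUOTED_STRING]

theorem pv_s1_other (d : PySem.Dict String String) (nm v : List Char) {c : Char}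
    (hq : c ≠ '"') (hs : c ≠ ';') (hn : c ≠ '\x00') (hsp : PySem.Chars.isspace c = false) :
    pvStepA (d, nm, v, 1) c = (d, nm, v ++ [c], 3) := by
  simp [pvStepA, PARAM_STATE_NAME, PARAM_STATE_VALUE_OR_QUOTE, PARAM_STATE_STRING,
    hq, hs, hn, hsp]

theorem pv_s2_nul (d : PySem.Dict String String) (nm v : List Char) :
    pvStepA (d, nm, v, 2) '\x00' =
      (d.insert (String.ofList (PySem.Chars.strip nm)) (String.ofList v), [], [], 4) := by
  simp [pvStepA, PARAM_STATE_NAME, PARAM_STATE_VALUE_OR_QUOTE, PARAM_STATE_QUOTED_STRING,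
    PARAM_STATE_AFTER_QUOTED_STRING]

theorem pv_s2_quote (d : PySem.Dict String String) (nm v : List Char) :
    pvStepA (d, nm, v, 2) '"' =
      (d.insert (String.ofList (PySem.Chars.strip nm)) (String.ofList v), [], [], 4) := by
  simp [pvStepA, PARAM_STATE_NAME, PARAM_STATE_VALUE_OR_QUOTE, PARAM_STATE_QUOTED_STRING,
    PARAM_STATE_AFTER_QUOTED_STRING]

theorem pv_s3_nul (d : PySem.Dict String String) (nm v : List Char) :
    pvStepA (d, nm, v, 3) '\x00' =
      (d.insert (String.ofList (PySem.Chars.strip nm))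
        (String.ofList (PySem.Chars.strip v)), [], [], 0) := by
  simp [pvStepA, PARAM_STATE_NAME, PARAM_STATE_VALUE_OR_QUOTE, PARAM_STATE_QUOTED_STRING,
    PARAM_STATE_STRING]

theorem pv_s3_semi (d : PySem.Dict String String) (nm v : List Char) :
    pvStepA (d, nm, v, 3) ';' =
      (d.insert (String.ofList (PySem.Chars.strip nm))
        (String.ofList (PySem.Chars.strip v)), [], [], 0) := by
  simp [pvStepA, PARAM_STATE_NAME, PARAM_STATE_VALUE_OR_QUOTE, PARAM_STATE_QUOTED_STRING,
    PARAM_STATE_STRING]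

theorem pv_s4_nul (d : PySem.Dict String String) (nm v : List Char) :
    pvStepA (d, nm, v, 4) '\x00' = (d, nm, v, 4) := by
  simp [pvStepA, PARAM_STATE_NAME, PARAM_STATE_VALUE_OR_QUOTE, PARAM_STATE_QUOTED_STRING,
    PARAM_STATE_STRING, PARAM_STATE_AFTER_QUOTED_STRING]

theorem pv_s4_semi (d : PySem.Dict String String) (nm v : List Char) :
    pvStepA (d, nm, v, 4) ';' = (d, nm, v, 0) := by
  simp [pvStepA, PARAM_STATE_NAME, PARAM_STATE_VALUE_OR_QUOTE, PARAM_STATE_QUOTED_STRING,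
    PARAM_STATE_STRING, PARAM_STATE_AFTER_QUOTED_STRING]

theorem pv_main_aux : ∀ (n : Nat) (l : List Char), l.length ≤ n →
    ∀ (d : PySem.Dict String String), (∀ c ∈ l, c ≠ '\x00') →
    ((l ++ ['\x00']).foldl pvStepA (d, [], [], 0)).1 = pvParseB l d := by
  intro n
  induction n using Nat.strong_induction_on with
  | _ n ih =>
  intro l hlen d hl
  -- split off the name segment
  have hsplit : l ++ ['\x00'] =
      l.takeWhile pvNotNameEnd ++ (l.dropWhile pvNotNameEnd ++ ['\x00']) := by
    rw [← List.append_assoc, List.takeWhile_append_dropWhile]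
  have hname : (l.takeWhile pvNotNameEnd).foldl pvStepA (d, ([] : List Char), ([] : List Char), 0)
      = (d, l.takeWhile pvNotNameEnd, [], 0) := by
    rw [pv_runA_name _ _ _ _ (fun c hc => ⟨(pv_take_mem c hc).1, hl c (pv_take_mem c hc).2⟩)]
    simp
  rw [hsplit, List.foldl_append, hname]
  rcases hdropN : l.dropWhile pvNotNameEnd with _ | ⟨c, r⟩
  · -- end of input right after the name
    rw [pvParseB.eq_def, hdropN]
    simp [pv_s0_nul]
  · have hrmem := pv_suffix_mem hdropN
    have hrlen := pv_dropWhile_cons_len hdropN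
    have hce : c = '=' ∨ c = ';' := by
      have hh := pv_dropWhile_head hdropN
      simp [pvNotNameEnd] at hh
      tauto
    rw [pvParseB.eq_def, hdropN]
    rcases hce with rfl | rfl
    · -- '=' : value follows
      simp only [List.cons_append, List.foldl_cons, pv_s0_eq,
        show ('=' : Char) = ';' ↔ False from by simp, if_false]
      -- skip whitespace in state 1
      have hsplit2 : r ++ ['\x00'] =
          r.takeWhile PySem.Chars.isspace ++ (r.dropWhile PySem.Chars.isspace ++ ['\x00']) := by
        rw [← List.append_assoc, List.takeWhile_append_dropWhile]
      have hskip : (r.takeWhile PySem.Chars.isspace).foldl pvStepA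
          (d, l.takeWhile pvNotNameEnd, [], 1) = (d, l.takeWhile pvNotNameEnd, [], 1) :=
        pv_runA_skip _ _ _ _ (fun c hc => (pv_take_mem c hc).1)
      rw [hsplit2, List.foldl_append, hskip]
      rcases hdropS : r.dropWhile PySem.Chars.isspace with _ | ⟨c2, t⟩
      · simp [pv_s1_nul]
      · have htmem := pv_suffix_mem hdropS
        have htlen := pv_dropWhile_cons_len hdropS
        have hc2sp : PySem.Chars.isspace c2 = false := pv_dropWhile_head hdropS
        by_cases hc2semi : c2 = ';'
        · subst hc2semi
          simp only [List.cons_append, List.foldl_cons, pv_s1_semi, reduceIte]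
          exact ih t.length (by omega) t le_rfl _
            (fun x hx => hl x (hrmem.2 _ (htmem.2 x hx)))
        · by_cases hc2q : c2 = '"'
          · subst hc2q
            simp only [List.cons_append, List.foldl_cons, pv_s1_quote, hc2semi, reduceIte]
            -- quoted string: accumulate until '"'
            have hsplit3 : t ++ ['\x00'] =
                t.takeWhile pvNotQuote ++ (t.dropWhile pvNotQuote ++ ['\x00']) := by
              rw [← List.append_assoc, List.takeWhile_append_dropWhile]
            have hquoted : (t.takeWhile pvNotQuote).foldl pvStepA
                (d, l.takeWhile pvNotNameEnd, [], 2)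
                = (d, l.takeWhile pvNotNameEnd, t.takeWhile pvNotQuote, 2) := by
              rw [pv_runA_quoted _ _ _ _ (fun x hx =>
                ⟨by simpa [pvNotQuote] using (pv_take_mem x hx).1,
                 hl x (hrmem.2 _ (htmem.2 x (pv_take_mem x hx).2))⟩)]
              simp
            rw [hsplit3, List.foldl_append, hquoted]
            rcases hdropQ : t.dropWhile pvNotQuote with _ | ⟨c3, u⟩
            · simp [pv_s2_nul]
            · have humem := pv_suffix_mem hdropQ
              have hulen := pv_dropWhile_cons_len hdropQ
              have hc3 : c3 = '"' := by
                have hh := pv_dropWhile_head hdropQ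
                simpa [pvNotQuote] using hh
              subst hc3
              simp only [List.cons_append, List.foldl_cons, pv_s2_quote]
              -- state 4: ignore until ';'
              have hsplit4 : u ++ ['\x00'] =
                  u.takeWhile pvNotSemi ++ (u.dropWhile pvNotSemi ++ ['\x00']) := by
                rw [← List.append_assoc, List.takeWhile_append_dropWhile]
              have hafter : (u.takeWhile pvNotSemi).foldl pvStepA
                  (d.insert (String.ofList (PySem.Chars.strip (l.takeWhile pvNotNameEnd)))
                    (String.ofList (t.takeWhile pvNotQuote)), [], [], 4)
                  = (d.insert (String.ofList (PySem.Chars.strip (l.takeWhile pvNotNameEnd)))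
                    (String.ofList (t.takeWhile pvNotQuote)), [], [], 4) :=
                pv_runA_after _ _ _ _ (fun x hx => by
                  simpa [pvNotSemi] using (pv_take_mem x hx).1)
              rw [hsplit4, List.foldl_append, hafter]
              rcases hdropU : u.dropWhile pvNotSemi with _ | ⟨c4, w⟩
              · simp [pv_s4_nul]
              · have hwmem := pv_suffix_mem hdropU
                have hwlen := pv_dropWhile_cons_len hdropU
                have hc4 : c4 = ';' := by
                  have hh := pv_dropWhile_head hdropU
                  simpa [pvNotSemi] using hh
                subst hc4
                simp only [List.cons_append, List.foldl_cons, pv_s4_semi]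
                exact ih w.length (by omega) w le_rfl _
                  (fun x hx => hl x (hrmem.2 _ (htmem.2 _ (humem.2 _ (hwmem.2 x hx)))))
          · -- unquoted value, starts at c2
            have hc2n : c2 ≠ '\x00' := hl c2 (hrmem.2 _ htmem.1)
            simp only [List.cons_append, List.foldl_cons,
              pv_s1_other _ _ _ hc2q hc2semi hc2n hc2sp, hc2semi, hc2q, reduceIte]
            have hc2ns : pvNotSemi c2 = true := by simp [pvNotSemi, hc2semi]
            rw [List.takeWhile_cons, if_pos hc2ns, List.dropWhile_cons, if_pos hc2ns]
            have hsplit5 : t ++ ['\x00'] =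
                t.takeWhile pvNotSemi ++ (t.dropWhile pvNotSemi ++ ['\x00']) := by
              rw [← List.append_assoc, List.takeWhile_append_dropWhile]
            have hstr : (t.takeWhile pvNotSemi).foldl pvStepA
                (d, l.takeWhile pvNotNameEnd, [c2], 3)
                = (d, l.takeWhile pvNotNameEnd, c2 :: t.takeWhile pvNotSemi, 3) := by
              rw [pv_runA_string _ _ _ _ (fun x hx =>
                ⟨by simpa [pvNotSemi] using (pv_take_mem x hx).1,
                 hl x (hrmem.2 _ (htmem.2 x (pv_take_mem x hx).2))⟩)]
              simp
            rw [hsplit5, List.foldl_append]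
            simp only [List.nil_append]
            rw [hstr]
            rcases hdropT : t.dropWhile pvNotSemi with _ | ⟨c5, w⟩
            · simp [pv_s3_nul]
            · have hwmem := pv_suffix_mem hdropT
              have hwlen := pv_dropWhile_cons_len hdropT
              have hc5 : c5 = ';' := by
                have hh := pv_dropWhile_head hdropT
                simpa [pvNotSemi] using hh
              subst hc5
              simp only [List.cons_append, List.foldl_cons, pv_s3_semi]
              exact ih w.length (by omega) w le_rfl _
                (fun x hx => hl x (hrmem.2 _ (htmem.2 _ (hwmem.2 x hx))))
    · -- ';' : blank value, next parameter
      simp only [List.cons_append, List.foldl_cons, pv_s0_semi, reduceIte]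
      exact ih r.length (by omega) r le_rfl _ (fun x hx => hl x (hrmem.2 x hx))

theorem pv_main (l : List Char) (d : PySem.Dict String String)
    (hl : ∀ c ∈ l, c ≠ '\x00') :
    ((l ++ ['\x00']).foldl pvStepA (d, [], [], 0)).1 = pvParseB l d :=
  pv_main_aux l.length l le_rfl d hl

-- ===== VERDICT (by name: the statement is the Claim_ definition above) =====
theorem cgi_parse_params_spec : Claim_equal_cgi_parse_params := by
  intro s hdom
  have hall : ∀ c ∈ s.toList, pvDomChar c = true := by
    simpa [Dom_cgi_parse_params, pvDomStr, List.all_eq_true] using hdom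
  have hl : ∀ c ∈ s.toList, c ≠ '\x00' := by
    intro c hc
    have h := hall c hc
    rintro rfl
    rw [show pvDomChar '\x00' = false from by decide] at h
    cases h
  simp only [Spec_cgi_parse_params, cgi_parse_params, cgi_parse_params_alt, PARAM_STATE_NAME]
  rw [pv_main s.toList _ hl]
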